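-- pv_equiv track=rewrite | github.com/mahanthesh0r/raf_v3_ws | scripts/raf_utils.py | organize_food_data
-- ===== SOURCE A (Python) =====
-- def organize_food_data(categories, clean_item_labels, item_masks, item_portions):
--     category_list, labels_list, per_food_masks, per_food_portions = [], [], [], []
--     for i in range(len(categories)):
--             if labels_list.count(clean_item_labels[i]) == 0:
--                 category_list.append(categories[i])
--                 labels_list.append(clean_item_labels[i])
--                 per_food_masks.append([item_masks[i]])
--                 per_food_portions.append(item_portions[i])
--             else:
--                 index = labels_list.index(clean_item_labels[i])
--                 per_food_masks[index].append(item_masks[i])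
--                 per_food_portions[index] += item_portions[i]
--     return category_list, labels_list, per_food_masks, per_food_portions
-- ===== SOURCE B (Python) =====
-- def organize_food_data(categories, clean_item_labels, item_masks, item_portions):
--     n = len(categories)
--     labels_list = []
--     for i in range(n):
--         lab = clean_item_labels[i]
--         if lab not in labels_list:
--             labels_list.append(lab)
--     category_list, per_food_masks, per_food_portions = [], [], []
--     for lab in labels_list:
--         idxs = [i for i in range(n) if clean_item_labels[i] == lab]
--         category_list.append(categories[idxs[0]])
--         per_food_masks.append([item_masks[i] for i in idxs])
--         per_food_portions.append(sum(item_portions[i] for i in idxs))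
--     return category_list, labels_list, per_food_masks, per_food_portions
-- ===== Notes on version B (the rewrite author's own statement) =====
-- stated objective: alternative
-- what changed: A builds the grouping incrementally in one pass, maintaining four parallel accumulator lists and dispatching each item with count()/index() into the row of its label; B is a staged group-then-gather: a first pass computes the distinct labels in first-seen order, then for each label a separate pass gathers that label's index set and builds the category (first index), mask list and portion sum from it.
import Mathlib
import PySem

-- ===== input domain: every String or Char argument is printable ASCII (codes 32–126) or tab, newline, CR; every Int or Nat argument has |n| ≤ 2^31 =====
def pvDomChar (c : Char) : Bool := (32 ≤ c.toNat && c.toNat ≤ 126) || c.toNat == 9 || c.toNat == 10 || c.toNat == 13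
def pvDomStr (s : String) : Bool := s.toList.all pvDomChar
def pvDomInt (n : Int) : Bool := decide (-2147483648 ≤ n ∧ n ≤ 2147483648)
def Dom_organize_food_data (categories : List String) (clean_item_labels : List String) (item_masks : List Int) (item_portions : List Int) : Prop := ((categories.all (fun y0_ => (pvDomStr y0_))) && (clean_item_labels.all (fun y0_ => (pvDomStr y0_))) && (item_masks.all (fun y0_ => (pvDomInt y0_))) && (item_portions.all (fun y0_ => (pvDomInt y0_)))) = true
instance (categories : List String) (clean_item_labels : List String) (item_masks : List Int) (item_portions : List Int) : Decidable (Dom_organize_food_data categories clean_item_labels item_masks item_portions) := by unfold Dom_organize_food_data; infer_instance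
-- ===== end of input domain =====

-- B replaces A's incremental single pass (four parallel accumulators, count()/index() dispatch
-- per item) by a staged group-then-gather: first the distinct labels in first-seen order, then
-- one gathering pass per label (objective: alternative; neither version mutates its arguments).

-- ===== PORT A =====
-- literal transliteration of A: index loop over range(len(categories)), four parallel
-- accumulator lists, membership via labels_list.count, position via labels_list.index
def organize_food_data (categories : List String) (clean_item_labels : List String) (item_masks : List Int) (item_portions : List Int) : List String × List String × List (List Int) × List Int :=
  (PySem.List.pyRange 0 (PySem.List.len categories) 1).foldl
    (fun st i =>
      let cl := st.1; let ll := st.2.1; let pm := st.2.2.1; let pp := st.2.2.2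
      let lab := PySem.List.pyGetD clean_item_labels i ""
      if List.count lab ll == 0 then
        (cl ++ [PySem.List.pyGetD categories i ""], ll ++ [lab],
         pm ++ [[PySem.List.pyGetD item_masks i 0]], pp ++ [PySem.List.pyGetD item_portions i 0])
      else
        -- labels_list.index: the guard guarantees membership, so index? is some; getD 0 is dead
        let idx := (PySem.List.index? ll lab).getD 0
        (cl, ll, pm.modify idx (fun ms => ms ++ [PySem.List.pyGetD item_masks i 0]),
         pp.modify idx (fun t => t + PySem.List.pyGetD item_portions i 0)))
    ([], [], [], [])

-- ===== PORT B =====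
-- literal transliteration of B: pass 1 collects the distinct labels in first-seen order;
-- pass 2, per label, gathers its index set idxs and builds the three remaining outputs from it
-- (idxs[0] ported as idxs.getD 0 0: idxs is nonempty for every collected label)
def organize_food_data_alt (categories : List String) (clean_item_labels : List String) (item_masks : List Int) (item_portions : List Int) : List String × List String × List (List Int) × List Int :=
  let n := PySem.List.len categories
  let labels_list :=
    (PySem.List.pyRange 0 n 1).foldl
      (fun ll i =>
        let lab := PySem.List.pyGetD clean_item_labels i ""
        if ll.contains lab then ll else ll ++ [lab]) []
  let rest := labels_list.foldl
    (fun st lab =>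
      let idxs := (PySem.List.pyRange 0 n 1).filter
        (fun i => PySem.List.pyGetD clean_item_labels i "" == lab)
      (st.1 ++ [PySem.List.pyGetD categories (idxs.getD 0 0) ""],
       st.2.1 ++ [idxs.map (fun i => PySem.List.pyGetD item_masks i 0)],
       st.2.2 ++ [(idxs.map (fun i => PySem.List.pyGetD item_portions i 0)).sum]))
    ([], [], [])
  (rest.1, labels_list, rest.2.1, rest.2.2)

-- ===== PRECONDITION & SPEC =====
-- Pre_: A indexes clean_item_labels/item_masks/item_portions at every i < len(categories),
-- so it raises IndexError exactly when one of them is shorter than categories.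
def Pre_organize_food_data (categories : List String) (clean_item_labels : List String) (item_masks : List Int) (item_portions : List Int) : Prop :=
  categories.length ≤ clean_item_labels.length ∧ categories.length ≤ item_masks.length ∧ categories.length ≤ item_portions.length
instance (categories : List String) (clean_item_labels : List String) (item_masks : List Int) (item_portions : List Int) : Decidable (Pre_organize_food_data categories clean_item_labels item_masks item_portions) := by unfold Pre_organize_food_data; infer_instance
def pvWitness_organize_food_data : List String × List String × List Int × List Int :=
  (["veg", "fruit", "veg"], ["pea", "apple", "pea"], [1, 2, 3], [10, 20, 30])

def Spec_organize_food_data (categories : List String) (clean_item_labels : List String) (item_masks : List Int) (item_portions : List Int) (out : List String × List String × List (List Int) × List Int) : Prop := out = organize_food_data_alt categories clean_item_labels item_masks item_portions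
instance (categories : List String) (clean_item_labels : List String) (item_masks : List Int) (item_portions : List Int) (out : List String × List String × List (List Int) × List Int) : Decidable (Spec_organize_food_data categories clean_item_labels item_masks item_portions out) := by unfold Spec_organize_food_data; infer_instance

-- ===== CLAIM (what is proved, stated in full; the proofs are below) =====
def Claim_equal_organize_food_data : Prop := ∀ (categories : List String) (clean_item_labels : List String) (item_masks : List Int) (item_portions : List Int), Dom_organize_food_data categories clean_item_labels item_masks item_portions → Pre_organize_food_data categories clean_item_labels item_masks item_portions → Spec_organize_food_data categories clean_item_labels item_masks item_portions (organize_food_data categories clean_item_labels item_masks item_portions)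

-- ===== LEMMAS AND PROOFS =====

-- A's loop body, on a prefetched row (category, label, mask, portion)
def pvStepA (st : List String × List String × List (List Int) × List Int)
    (r : String × String × Int × Int) : List String × List String × List (List Int) × List Int :=
  let cl := st.1; let ll := st.2.1; let pm := st.2.2.1; let pp := st.2.2.2
  if List.count r.2.1 ll == 0 then
    (cl ++ [r.1], ll ++ [r.2.1], pm ++ [[r.2.2.1]], pp ++ [r.2.2.2])
  else
    let idx := (PySem.List.index? ll r.2.1).getD 0
    (cl, ll, pm.modify idx (fun ms => ms ++ [r.2.2.1]), pp.modify idx (fun t => t + r.2.2.2))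

-- first-seen-order dedup (B's pass 1, phrased on any list of labels)
def pvDedup (xs : List String) : List String :=
  xs.foldl (fun acc l => if acc.contains l then acc else acc ++ [l]) []

lemma pv_mem_dedup_aux (xs : List String) :
    ∀ (acc : List String) (l : String),
      (l ∈ xs.foldl (fun acc l => if acc.contains l then acc else acc ++ [l]) acc) ↔ l ∈ acc ∨ l ∈ xs := by
  induction xs with
  | nil => simp
  | cons x xs ih =>
    intro acc l
    simp only [List.foldl_cons]
    by_cases hx : acc.contains x
    · rw [if_pos hx]
      rw [ih]
      constructor
      · rintro (h | h)
        · exact Or.inl h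
        · exact Or.inr (List.mem_cons_of_mem _ h)
      · rintro (h | h)
        · exact Or.inl h
        · rcases List.mem_cons.mp h with h | h
          · exact Or.inl (h ▸ (by simpa using hx))
          · exact Or.inr h
    · rw [if_neg hx, ih]
      simp only [List.mem_append, List.mem_singleton, List.mem_cons]
      tauto

lemma pv_mem_dedup (xs : List String) (l : String) : l ∈ pvDedup xs ↔ l ∈ xs := by
  unfold pvDedup; rw [pv_mem_dedup_aux]; simp

lemma pv_nodup_dedup_aux (xs : List String) :
    ∀ (acc : List String), acc.Nodup →
      (xs.foldl (fun acc l => if acc.contains l then acc else acc ++ [l]) acc).Nodup := by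
  induction xs with
  | nil => intro acc h; simpa using h
  | cons x xs ih =>
    intro acc h
    simp only [List.foldl_cons]
    by_cases hx : acc.contains x
    · rw [if_pos hx]; exact ih acc h
    · rw [if_neg hx]
      refine ih _ ?_
      refine List.Nodup.append h (List.nodup_singleton x) ?_
      intro a ha hb
      simp only [List.mem_singleton] at hb
      subst hb
      exact hx (by simpa using ha)

lemma pv_nodup_dedup (xs : List String) : (pvDedup xs).Nodup :=
  pv_nodup_dedup_aux xs [] List.nodup_nil

lemma pv_dedup_snoc (xs : List String) (x : String) :
    pvDedup (xs ++ [x]) = if (pvDedup xs).contains x then pvDedup xs else pvDedup xs ++ [x] := by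
  unfold pvDedup; rw [List.foldl_append]; rfl

-- rows of the zipped input, and the group/gather reading of the result
def pvGrp (lab : String) (rs : List (String × String × Int × Int)) :
    List (String × String × Int × Int) :=
  rs.filter (fun q => q.2.1 == lab)

def pvLabs (rs : List (String × String × Int × Int)) : List String :=
  pvDedup (rs.map (fun r => r.2.1))

def pvStateOf (rs : List (String × String × Int × Int)) :
    List String × List String × List (List Int) × List Int :=
  ((pvLabs rs).map (fun l => ((pvGrp l rs).head?.map (fun q => q.1)).getD ""),
   pvLabs rs,
   (pvLabs rs).map (fun l => (pvGrp l rs).map (fun q => q.2.2.1)),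
   (pvLabs rs).map (fun l => ((pvGrp l rs).map (fun q => q.2.2.2)).sum))

-- mapping a function changed only at the (unique) position idx of lab is a List.modify
lemma pv_map_modify {α : Type} (labs : List String) (lab : String) (idx : Nat)
    (hnd : labs.Nodup) (hidx : PySem.List.index? labs lab = some idx)
    (f f' : String → α) (gmod : α → α)
    (hne : ∀ l ∈ labs, l ≠ lab → f' l = f l) (heq : f' lab = gmod (f lab)) :
    labs.map f' = (labs.map f).modify idx gmod := by
  obtain ⟨hk, hlab, -⟩ := PySem.List.getElem_of_index?_eq_some hidx
  apply List.ext_getElem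
  · simp [List.length_modify]
  intro j hj₁ hj₂
  simp only [List.length_map] at hj₁
  have hkey : labs[j] = lab ↔ j = idx := by
    constructor
    · intro hl
      have he : labs[j]'hj₁ = labs[idx]'hk := by rw [hl, hlab]
      exact (List.Nodup.getElem_inj_iff hnd).mp he
    · intro he; subst he; exact hlab
  simp only [List.getElem_map, List.getElem_modify]
  by_cases hcase : j = idx
  · subst hcase
    have h1 : labs[j] = lab := hkey.mpr rfl
    simp [h1, heq]
  · have h1 : labs[j] ≠ lab := fun hl => hcase (hkey.mp hl)
    simp [Ne.symm hcase, hne labs[j] (List.getElem_mem hj₁) h1]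

lemma pv_grp_snoc (lab : String) (rs : List (String × String × Int × Int))
    (r : String × String × Int × Int) :
    pvGrp lab (rs ++ [r]) = pvGrp lab rs ++ (if r.2.1 == lab then [r] else []) := by
  unfold pvGrp
  rw [List.filter_append]
  simp [List.filter_singleton]

lemma pv_grp_ne_nil (lab : String) (rs : List (String × String × Int × Int))
    (h : lab ∈ pvLabs rs) : pvGrp lab rs ≠ [] := by
  unfold pvLabs at h
  rw [pv_mem_dedup, List.mem_map] at h
  obtain ⟨r, hr, hlab⟩ := h
  intro hnil
  have := List.filter_eq_nil_iff.mp hnil r hr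
  simp [hlab] at this

lemma pv_grp_nil_of_not_mem (lab : String) (rs : List (String × String × Int × Int))
    (h : lab ∉ pvLabs rs) : pvGrp lab rs = [] := by
  unfold pvLabs at h
  rw [pv_mem_dedup] at h
  apply List.filter_eq_nil_iff.mpr
  intro r hr
  simp only [beq_iff_eq]
  intro he
  exact h (List.mem_map.mpr ⟨r, hr, he⟩)

lemma pv_labs_snoc (rs : List (String × String × Int × Int)) (r : String × String × Int × Int) :
    pvLabs (rs ++ [r])
      = if r.2.1 ∈ pvLabs rs then pvLabs rs else pvLabs rs ++ [r.2.1] := by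
  unfold pvLabs
  rw [List.map_append]
  simp only [List.map_cons, List.map_nil]
  rw [pv_dedup_snoc]
  by_cases h : r.2.1 ∈ pvDedup (rs.map (fun r => r.2.1))
  · rw [if_pos (by simpa using h), if_pos h]
  · rw [if_neg (by simpa using h), if_neg h]

-- the key step: A's loop body advances the group-then-gather reading by one row
lemma pv_step (rs : List (String × String × Int × Int)) (r : String × String × Int × Int) :
    pvStepA (pvStateOf rs) r = pvStateOf (rs ++ [r]) := by
  by_cases hmem : r.2.1 ∈ pvLabs rs
  · -- existing label
    have hcnt : List.count r.2.1 (pvLabs rs) ≠ 0 := by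
      simpa [List.count_eq_zero] using hmem
    obtain ⟨idx, hidx⟩ : ∃ idx, PySem.List.index? (pvLabs rs) r.2.1 = some idx :=
      Option.isSome_iff_exists.mp ((PySem.List.index?_isSome_iff _ _).mpr hmem)
    have hlabs : pvLabs (rs ++ [r]) = pvLabs rs := by rw [pv_labs_snoc, if_pos hmem]
    have hgrps : ∀ l, pvGrp l (rs ++ [r])
        = pvGrp l rs ++ (if r.2.1 == l then [r] else []) := fun l => pv_grp_snoc l rs r
    have hgrp_ne : ∀ l ∈ pvLabs rs, l ≠ r.2.1 → pvGrp l (rs ++ [r]) = pvGrp l rs := by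
      intro l _ hne
      rw [hgrps l, if_neg (by simpa using (Ne.symm hne)), List.append_nil]
    have hgrp_eq : pvGrp r.2.1 (rs ++ [r]) = pvGrp r.2.1 rs ++ [r] := by
      rw [hgrps r.2.1, if_pos (by simp)]
    have hne_nil := pv_grp_ne_nil r.2.1 rs hmem
    have hcats : (pvLabs (rs ++ [r])).map (fun l => ((pvGrp l (rs ++ [r])).head?.map (fun q => q.1)).getD "")
        = (pvLabs rs).map (fun l => ((pvGrp l rs).head?.map (fun q => q.1)).getD "") := by
      rw [hlabs]
      apply List.map_congr_left
      intro l hl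
      by_cases hcase : l = r.2.1
      · rw [hcase, hgrp_eq]
        cases hg : pvGrp r.2.1 rs with
        | nil => exact absurd hg hne_nil
        | cons a t => simp
      · rw [hgrp_ne l hl hcase]
    have hmasks : (pvLabs (rs ++ [r])).map (fun l => (pvGrp l (rs ++ [r])).map (fun q => q.2.2.1))
        = ((pvLabs rs).map (fun l => (pvGrp l rs).map (fun q => q.2.2.1))).modify idx
            (fun ms => ms ++ [r.2.2.1]) := by
      rw [hlabs]
      apply pv_map_modify (pvLabs rs) r.2.1 idx (pv_nodup_dedup _) hidx
      · intro l hl hne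
        rw [hgrp_ne l hl hne]
      · rw [hgrp_eq, List.map_append]; rfl
    have hports : (pvLabs (rs ++ [r])).map (fun l => ((pvGrp l (rs ++ [r])).map (fun q => q.2.2.2)).sum)
        = ((pvLabs rs).map (fun l => ((pvGrp l rs).map (fun q => q.2.2.2)).sum)).modify idx
            (fun t => t + r.2.2.2) := by
      rw [hlabs]
      apply pv_map_modify (pvLabs rs) r.2.1 idx (pv_nodup_dedup _) hidx
      · intro l hl hne
        rw [hgrp_ne l hl hne]
      · rw [hgrp_eq, List.map_append, List.sum_append]; simp
    simp only [pvStepA, pvStateOf, hcnt, beq_iff_eq, if_neg (by simpa using hcnt), hidx]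
    rw [hcats, hmasks, hports, hlabs]
    rfl
  · -- fresh label
    have hcnt : List.count r.2.1 (pvLabs rs) = 0 := List.count_eq_zero.mpr hmem
    have hlabs : pvLabs (rs ++ [r]) = pvLabs rs ++ [r.2.1] := by
      rw [pv_labs_snoc, if_neg hmem]
    have hgrp_old : ∀ l ∈ pvLabs rs, pvGrp l (rs ++ [r]) = pvGrp l rs := by
      intro l hl
      rw [pv_grp_snoc, if_neg, List.append_nil]
      simp only [beq_iff_eq]
      intro he; exact hmem (he ▸ hl)
    have hgrp_new : pvGrp r.2.1 (rs ++ [r]) = [r] := by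
      rw [pv_grp_snoc, pv_grp_nil_of_not_mem r.2.1 rs hmem, if_pos (by simp), List.nil_append]
    have hcats : (pvLabs rs).map (fun l => ((pvGrp l (rs ++ [r])).head?.map (fun q => q.1)).getD "")
        = (pvLabs rs).map (fun l => ((pvGrp l rs).head?.map (fun q => q.1)).getD "") :=
      List.map_congr_left (fun l hl => by rw [hgrp_old l hl])
    have hmasks : (pvLabs rs).map (fun l => (pvGrp l (rs ++ [r])).map (fun q => q.2.2.1))
        = (pvLabs rs).map (fun l => (pvGrp l rs).map (fun q => q.2.2.1)) :=
      List.map_congr_left (fun l hl => by rw [hgrp_old l hl])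
    have hports : (pvLabs rs).map (fun l => ((pvGrp l (rs ++ [r])).map (fun q => q.2.2.2)).sum)
        = (pvLabs rs).map (fun l => ((pvGrp l rs).map (fun q => q.2.2.2)).sum) :=
      List.map_congr_left (fun l hl => by rw [hgrp_old l hl])
    have hguard : (List.count r.2.1 (pvLabs rs) == 0) = true := by simp [hcnt]
    simp only [pvStepA, pvStateOf, hguard, if_true]
    rw [hlabs]
    simp only [List.map_append, List.map_cons, List.map_nil]
    rw [hcats, hmasks, hports, hgrp_new]
    simp

lemma pv_foldA (rs : List (String × String × Int × Int)) :
    rs.foldl pvStepA ([], [], [], []) = pvStateOf rs := by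
  induction rs using List.reverseRecOn with
  | nil => rfl
  | append_singleton rs r ih =>
    rw [List.foldl_append, List.foldl_cons, List.foldl_nil, ih, pv_step]

-- B's second loop appends one element per label to each of three lists: it is three maps
lemma pv_foldl_triple {A B C : Type} (f : String → A) (g : String → B) (h : String → C)
    (labs : List String) :
    ∀ (acc : List A × List B × List C),
      labs.foldl (fun st lab => (st.1 ++ [f lab], st.2.1 ++ [g lab], st.2.2 ++ [h lab])) acc
        = (acc.1 ++ labs.map f, acc.2.1 ++ labs.map g, acc.2.2 ++ labs.map h) := by
  induction labs with
  | nil => intro acc; simp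
  | cons x xs ih =>
    intro acc
    rw [List.foldl_cons, ih]
    simp

-- the rows A iterates over, as getD reads at each loop index
def pvRowAt (categories : List String) (clean_item_labels : List String) (item_masks : List Int)
    (item_portions : List Int) (k : Nat) : String × String × Int × Int :=
  (categories.getD k "", clean_item_labels.getD k "", item_masks.getD k 0, item_portions.getD k 0)

def pvRows (categories : List String) (clean_item_labels : List String) (item_masks : List Int)
    (item_portions : List Int) : List (String × String × Int × Int) :=
  (List.range categories.length).map (pvRowAt categories clean_item_labels item_masks item_portions)

lemma pv_grp_rows (categories : List String) (clean_item_labels : List String)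
    (item_masks : List Int) (item_portions : List Int) (lab : String) :
    pvGrp lab (pvRows categories clean_item_labels item_masks item_portions)
      = ((List.range categories.length).filter (fun k => clean_item_labels.getD k "" == lab)).map
          (pvRowAt categories clean_item_labels item_masks item_portions) := by
  unfold pvGrp pvRows
  rw [List.filter_map]
  rfl

lemma pv_idxs_eq (categories : List String) (clean_item_labels : List String) (lab : String) :
    (PySem.List.pyRange 0 (PySem.List.len categories) 1).filter
        (fun i => PySem.List.pyGetD clean_item_labels i "" == lab)
      = ((List.range categories.length).filter (fun k => clean_item_labels.getD k "" == lab)).map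
          (fun (k : Nat) => (k : Int)) := by
  rw [PySem.List.len_eq, PySem.List.pyRange_zero_nat, List.filter_map]
  exact congrArg (List.map (fun (k : Nat) => (k : Int)))
    (List.filter_congr (fun k _ => by simp [Function.comp_def]))

lemma pv_labels_eq (categories : List String) (clean_item_labels : List String)
    (item_masks : List Int) (item_portions : List Int) :
    (PySem.List.pyRange 0 (PySem.List.len categories) 1).foldl
        (fun ll i =>
          let lab := PySem.List.pyGetD clean_item_labels i ""
          if ll.contains lab then ll else ll ++ [lab]) []
      = pvLabs (pvRows categories clean_item_labels item_masks item_portions) := by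
  rw [PySem.List.len_eq, PySem.List.pyRange_zero_nat, List.foldl_map]
  unfold pvLabs pvDedup pvRows
  rw [List.map_map, List.foldl_map]
  simp [Function.comp_def, pvRowAt]

-- ===== VERDICT (by name: the statement is the Claim_ definition above) =====
theorem organize_food_data_spec : Claim_equal_organize_food_data := by
  intro categories clean_item_labels item_masks item_portions _ _
  unfold Spec_organize_food_data
  -- A's fold is pvStepA over the rows, hence the group-then-gather reading of the rows
  have hA : organize_food_data categories clean_item_labels item_masks item_portions
      = pvStateOf (pvRows categories clean_item_labels item_masks item_portions) := by
    have aEq : organize_food_data categories clean_item_labels item_masks item_portions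
        = (PySem.List.pyRange 0 (PySem.List.len categories) 1).foldl
            (fun st i => pvStepA st (PySem.List.pyGetD categories i "",
              PySem.List.pyGetD clean_item_labels i "", PySem.List.pyGetD item_masks i 0,
              PySem.List.pyGetD item_portions i 0)) ([], [], [], []) := rfl
    rw [aEq, PySem.List.len_eq, PySem.List.pyRange_zero_nat, List.foldl_map,
      ← pv_foldA (pvRows categories clean_item_labels item_masks item_portions)]
    unfold pvRows
    rw [List.foldl_map]
    simp [pvRowAt]
  rw [hA]
  -- B: unfold the two passes
  set rows := pvRows categories clean_item_labels item_masks item_portions with hrows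
  have bEq : organize_food_data_alt categories clean_item_labels item_masks item_portions
      = (let labels_list :=
           (PySem.List.pyRange 0 (PySem.List.len categories) 1).foldl
             (fun ll i =>
               let lab := PySem.List.pyGetD clean_item_labels i ""
               if ll.contains lab then ll else ll ++ [lab]) []
         let rest := labels_list.foldl
           (fun st lab =>
             (st.1 ++ [PySem.List.pyGetD categories
                (((PySem.List.pyRange 0 (PySem.List.len categories) 1).filter
                  (fun i => PySem.List.pyGetD clean_item_labels i "" == lab)).getD 0 0) ""],
              st.2.1 ++ [((PySem.List.pyRange 0 (PySem.List.len categories) 1).filter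
                  (fun i => PySem.List.pyGetD clean_item_labels i "" == lab)).map
                    (fun i => PySem.List.pyGetD item_masks i 0)],
              st.2.2 ++ [(((PySem.List.pyRange 0 (PySem.List.len categories) 1).filter
                  (fun i => PySem.List.pyGetD clean_item_labels i "" == lab)).map
                    (fun i => PySem.List.pyGetD item_portions i 0)).sum]))
           ([], [], [])
         (rest.1, labels_list, rest.2.1, rest.2.2)) := rfl
  rw [bEq]
  simp only [pv_labels_eq categories clean_item_labels item_masks item_portions,
    pv_foldl_triple, List.nil_append]
  -- per-label gather equals the group reading, for every collected label
  have hcat : ∀ lab ∈ pvLabs rows,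
      PySem.List.pyGetD categories
          (((PySem.List.pyRange 0 (PySem.List.len categories) 1).filter
            (fun i => PySem.List.pyGetD clean_item_labels i "" == lab)).getD 0 0) ""
        = ((pvGrp lab rows).head?.map (fun q => q.1)).getD "" := by
    intro lab hmem
    rw [pv_idxs_eq, hrows, pv_grp_rows]
    have hne : pvGrp lab rows ≠ [] := pv_grp_ne_nil lab rows hmem
    rw [hrows, pv_grp_rows] at hne
    cases hks : (List.range categories.length).filter
        (fun k => clean_item_labels.getD k "" == lab) with
    | nil => rw [hks] at hne; simp at hne
    | cons j t => simp [hks, pvRowAt]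
  have hmask : ∀ lab,
      ((PySem.List.pyRange 0 (PySem.List.len categories) 1).filter
          (fun i => PySem.List.pyGetD clean_item_labels i "" == lab)).map
        (fun i => PySem.List.pyGetD item_masks i 0)
        = (pvGrp lab rows).map (fun q => q.2.2.1) := by
    intro lab
    rw [pv_idxs_eq, hrows, pv_grp_rows, List.map_map, List.map_map]
    apply List.map_congr_left
    intro k _
    simp [Function.comp_def, pvRowAt]
  have hport : ∀ lab,
      ((PySem.List.pyRange 0 (PySem.List.len categories) 1).filter
          (fun i => PySem.List.pyGetD clean_item_labels i "" == lab)).map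
        (fun i => PySem.List.pyGetD item_portions i 0)
        = (pvGrp lab rows).map (fun q => q.2.2.2) := by
    intro lab
    rw [pv_idxs_eq, hrows, pv_grp_rows, List.map_map, List.map_map]
    apply List.map_congr_left
    intro k _
    simp [Function.comp_def, pvRowAt]
  unfold pvStateOf
  refine congrArg₂ _ ?_ (congrArg₂ _ rfl (congrArg₂ _ ?_ ?_))
  · exact (List.map_congr_left (fun lab hmem => hcat lab hmem)).symm
  · exact (List.map_congr_left (fun lab _ => hmask lab)).symm
  · exact (List.map_congr_left (fun lab _ => by rw [hport lab])).symm
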